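-- pv_equiv track=rewrite | github.com/Jeck-5iv/yandex | C v2.0.py | expected_check
-- ===== SOURCE A (Python) =====
-- def check(s):
--     stack = []
--     for i in range(len(s)):
--         if s[i] == '(':
--             stack.append('(')
--         elif s[i] == '|':
--             if len(stack) != 0 and stack[-1] == '(':
--                 stack.append('|')
--             else:
--                 return [False, False]
--         elif s[i] == ')':
--             if len(stack) < 2 or stack[-1] != '|' or stack[-2] != '(':
--                 return [False, False]
--             else:
--                 stack.pop()
--                 stack.pop()
--     if len(stack) != 0:
--         return [False, True]
--     return [True, True]
--
-- def expected_check(s, i):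
--     expected = []
--     for symbol in ['(', '|', ')']:
--         s_new = s[:i] + symbol
--         if check(s_new)[1]:
--             expected.append(symbol)
--     s_new = s[:i]
--     if check(s_new)[0]:
--         expected.append('END')
--     return expected
-- ===== SOURCE B (Python) =====
-- def expected_check(s, i):
--     prefix = s[:i]
--     stack = []
--     for ch in prefix:
--         if ch == '(':
--             stack.append('(')
--         elif ch == '|':
--             if stack and stack[-1] == '(':
--                 stack.append('|')
--             else:
--                 return []
--         elif ch == ')':
--             if len(stack) >= 2 and stack[-1] == '|' and stack[-2] == '(':
--                 stack.pop()
--                 stack.pop()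
--             else:
--                 return []
--     res = ['(']
--     if stack and stack[-1] == '(':
--         res.append('|')
--     if len(stack) >= 2 and stack[-1] == '|' and stack[-2] == '(':
--         res.append(')')
--     if not stack:
--         res.append('END')
--     return res
-- ===== Notes on version B (the rewrite author's own statement) =====
-- stated objective: faster
-- what changed: B scans the prefix s[:i] once, keeping the bracket stack, and answers the four questions ('(', '|', ')', 'END' allowed?) with O(1) tests on the final stack, instead of A's four separate full re-scans of concatenated strings via check().
import Mathlib
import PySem

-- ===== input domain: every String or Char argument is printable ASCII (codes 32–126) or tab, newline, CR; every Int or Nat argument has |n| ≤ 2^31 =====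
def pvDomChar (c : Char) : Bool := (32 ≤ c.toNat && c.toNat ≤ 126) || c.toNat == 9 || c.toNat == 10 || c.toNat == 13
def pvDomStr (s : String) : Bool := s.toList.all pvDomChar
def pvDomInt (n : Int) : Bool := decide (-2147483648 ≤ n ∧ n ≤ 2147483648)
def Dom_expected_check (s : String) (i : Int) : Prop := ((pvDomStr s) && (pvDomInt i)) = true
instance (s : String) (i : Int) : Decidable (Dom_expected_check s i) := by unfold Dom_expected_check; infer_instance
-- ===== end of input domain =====

-- B replaces A's four full re-scans of the prefix (via check on concatenated strings)
-- by ONE pass maintaining the bracket stack plus O(1) tests on the final stack.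

-- ===== PORT A =====
-- check's loop: stack is kept top-first (Python appends/pops at the end, looks at stack[-1], stack[-2])
def checkLoop : List Char → List Char → Bool × Bool
  | [], stack => (stack.isEmpty, true)
  | c :: rest, stack =>
    if c = '(' then checkLoop rest ('(' :: stack)
    else if c = '|' then
      if stack.head? = some '(' then checkLoop rest ('|' :: stack)
      else (false, false)
    else if c = ')' then
      if 2 ≤ stack.length ∧ stack.head? = some '|' ∧ stack[1]? = some '(' then
        checkLoop rest (stack.drop 2)   -- the two pops
      else (false, false)
    else checkLoop rest stack

def check (s : List Char) : Bool × Bool := checkLoop s []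

def expected_check (s : String) (i : Int) : List String :=
  let pre := PySem.List.slice s.toList none (some i)   -- s[:i]
  -- the loop 'for symbol in ['(', '|', ')']', each iteration re-checking pre ++ [symbol]
  let expected := [('(', "("), ('|', "|"), (')', ")")].foldl
    (fun acc p => if (check (pre ++ [p.1])).2 then acc ++ [p.2] else acc) []
  if (check pre).1 then expected ++ ["END"] else expected

-- ===== PORT B =====
-- single pass: none = parse error in the prefix, some st = final stack (top-first)
def scanB : List Char → List Char → Option (List Char)
  | [], stack => some stack
  | c :: rest, stack =>
    if c = '(' then scanB rest ('(' :: stack)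
    else if c = '|' then
      match stack with
      | '(' :: _ => scanB rest ('|' :: stack)
      | _ => none
    else if c = ')' then
      match stack with
      | '|' :: '(' :: s2 => scanB rest s2
      | _ => none
    else scanB rest stack

def expected_check_alt (s : String) (i : Int) : List String :=
  match scanB (PySem.List.slice s.toList none (some i)) [] with
  | none => []
  | some st =>
    ["("]
      ++ (match st with | '(' :: _ => ["|"] | _ => [])
      ++ (match st with | '|' :: '(' :: _ => [")"] | _ => [])
      ++ (if st.isEmpty then ["END"] else [])

-- ===== PRECONDITION & SPEC =====
def Spec_expected_check (s : String) (i : Int) (out : List String) : Prop := out = expected_check_alt s i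
instance (s : String) (i : Int) (out : List String) : Decidable (Spec_expected_check s i out) := by unfold Spec_expected_check; infer_instance

-- ===== CLAIM (what is proved, stated in full; the proofs are below) =====
def Claim_equal_expected_check : Prop := ∀ (s : String) (i : Int), Dom_expected_check s i → Spec_expected_check s i (expected_check s i)

-- ===== LEMMAS AND PROOFS =====

-- checkLoop over s ++ t factors through one scan of s
theorem checkLoop_append (s : List Char) : ∀ (t stack : List Char),
    checkLoop (s ++ t) stack =
      match scanB s stack with
      | none => (false, false)
      | some st => checkLoop t st := by
  induction s with
  | nil => intro t stack; simp [scanB]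
  | cons c rest ih =>
    intro t stack
    by_cases h1 : c = '('
    · simp [checkLoop, scanB, h1, ih]
    · by_cases h2 : c = '|'
      · cases stack with
        | nil => simp [checkLoop, scanB, h2]
        | cons a tl =>
          by_cases ha : a = '('
          · simp [checkLoop, scanB, h2, ha, ih]
          · simp [checkLoop, scanB, h2, ha]
      · by_cases h3 : c = ')'
        · cases stack with
          | nil => simp [checkLoop, scanB, h3]
          | cons a tl =>
            cases tl with
            | nil => simp [checkLoop, scanB, h3]
            | cons b tl2 =>
              by_cases ha : a = '|'
              · by_cases hb : b = '('
                · simp [checkLoop, scanB, h3, ha, hb, ih]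
                · simp [checkLoop, scanB, h3, ha, hb]
              · simp [checkLoop, scanB, h3, ha]
        · simp [checkLoop, scanB, h1, h2, h3, ih]

theorem check_append_single (s : List Char) (c : Char) :
    check (s ++ [c]) =
      match scanB s [] with
      | none => (false, false)
      | some st => checkLoop [c] st := by
  simp [check, checkLoop_append]

theorem check_self (s : List Char) :
    check s =
      match scanB s [] with
      | none => (false, false)
      | some st => (st.isEmpty, true) := by
  have := checkLoop_append s [] []
  simp only [List.append_nil] at this
  simpa [check, checkLoop] using this

-- ===== VERDICT (by name: the statement is the Claim_ definition above) =====
theorem expected_check_spec : Claim_equal_expected_check := by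
  intro s i _
  unfold Spec_expected_check expected_check expected_check_alt
  set pre := PySem.List.slice s.toList none (some i) with hpre
  simp only [List.foldl]
  rw [check_append_single pre '(', check_append_single pre '|',
      check_append_single pre ')', check_self pre]
  cases h : scanB pre [] with
  | none => simp [h]
  | some st =>
    cases st with
    | nil => simp [h, checkLoop]
    | cons a tl =>
      cases tl with
      | nil =>
        by_cases ha : a = '(' <;> simp [h, checkLoop, ha]
      | cons b tl2 =>
        by_cases ha : a = '('
        · simp [h, checkLoop, ha]
        · by_cases ha2 : a = '|'
          · by_cases hb : b = '(' <;> simp [h, checkLoop, ha, ha2, hb]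
          · simp [checkLoop, ha, ha2]
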